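-- pv_equiv track=rewrite | github.com/THUDM/BattleAgentBench | battle_city/examples/agent/basic_prompt/agent_util_data.py | get_nearst_walls
-- ===== SOURCE A (Python) =====
-- def compute_distance(tank, walls):
--     pos_x, pos_y = tank[1], tank[2]
--     wall_dis = []
--     for wall in walls:
--         wall_distance = abs(pos_x - wall[0]) + abs(pos_y-wall[1])
--         wall_dis.append(wall_distance)
--     return wall_dis
--
-- def get_nearst_walls(own_tank, map_walls):
--     metals = [w for w in map_walls if w[2] == 'metal']
--     dis_metals = compute_distance(own_tank, metals)
--     sorted_metals = sorted(enumerate(dis_metals), key=lambda x: x[-1])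
--     sorted_metals = [metals[idx] for idx, _ in sorted_metals]
--     waters = [w for w in map_walls if w[2] == 'water']
--     dis_waters = compute_distance(own_tank, waters)
--     sorted_waters = sorted(enumerate(dis_waters), key=lambda x: x[-1])
--     sorted_waters = [waters[idx] for idx, _ in sorted_waters]
--     return sorted_metals + sorted_waters
-- ===== SOURCE B (Python) =====
-- def get_nearst_walls(own_tank, map_walls):
--     px, py = own_tank[1], own_tank[2]
--     walls = [w for w in map_walls if w[2] in ('metal', 'water')]
--     return sorted(walls, key=lambda w: (0 if w[2] == 'metal' else 1,
--                                         abs(px - w[0]) + abs(py - w[1])))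
-- ===== Notes on version B (the rewrite author's own statement) =====
-- stated objective: simpler
-- what changed: Replaces A's two filter + distance-list + enumerate-index-sort + remap blocks with one filter and a single stable sort under the compound key (category, Manhattan distance), relying on sort stability for metal-before-water and tie order.
import Mathlib
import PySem

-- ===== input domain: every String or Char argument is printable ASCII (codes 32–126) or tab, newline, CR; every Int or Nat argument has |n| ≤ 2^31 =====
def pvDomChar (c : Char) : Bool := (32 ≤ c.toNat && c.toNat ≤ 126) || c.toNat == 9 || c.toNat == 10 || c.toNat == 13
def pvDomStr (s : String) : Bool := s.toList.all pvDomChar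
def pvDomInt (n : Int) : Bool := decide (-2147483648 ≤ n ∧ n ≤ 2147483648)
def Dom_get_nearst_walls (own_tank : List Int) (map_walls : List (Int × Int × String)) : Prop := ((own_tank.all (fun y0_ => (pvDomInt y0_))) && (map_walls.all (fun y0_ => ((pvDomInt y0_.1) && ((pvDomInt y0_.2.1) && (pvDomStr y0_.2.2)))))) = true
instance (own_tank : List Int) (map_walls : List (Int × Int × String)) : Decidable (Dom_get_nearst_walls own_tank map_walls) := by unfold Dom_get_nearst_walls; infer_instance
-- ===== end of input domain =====

-- B replaces A's two filter + distance-list + enumerate-index-sort + remap blocks with one filter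
-- and a single stable sort under the compound key (category, Manhattan distance): simpler, same cost.

-- ===== PORT A =====
def compute_distance (tank : List Int) (walls : List (Int × Int × String)) : List Int :=
  let pos_x := PySem.List.pyGetD tank 1 0
  let pos_y := PySem.List.pyGetD tank 2 0
  walls.foldl (fun wall_dis wall => wall_dis ++ [|pos_x - wall.1| + |pos_y - wall.2.1|]) []

def get_nearst_walls (own_tank : List Int) (map_walls : List (Int × Int × String)) : List (Int × Int × String) :=
  let metals := map_walls.filter (fun w => w.2.2 == "metal")
  let dis_metals := compute_distance own_tank metals
  let sorted_metals := PySem.List.sorted (PySem.List.enumerate dis_metals) (fun x => x.2)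
  let sorted_metals := sorted_metals.map (fun p => PySem.List.pyGetD metals p.1 (0, 0, ""))
  let waters := map_walls.filter (fun w => w.2.2 == "water")
  let dis_waters := compute_distance own_tank waters
  let sorted_waters := PySem.List.sorted (PySem.List.enumerate dis_waters) (fun x => x.2)
  let sorted_waters := sorted_waters.map (fun p => PySem.List.pyGetD waters p.1 (0, 0, ""))
  sorted_metals ++ sorted_waters

-- ===== PORT B =====
def get_nearst_walls_alt (own_tank : List Int) (map_walls : List (Int × Int × String)) : List (Int × Int × String) :=
  let px := PySem.List.pyGetD own_tank 1 0
  let py := PySem.List.pyGetD own_tank 2 0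
  let walls := map_walls.filter (fun w => w.2.2 == "metal" || w.2.2 == "water")
  PySem.List.sorted2 walls (fun w => if w.2.2 == "metal" then (0 : Int) else 1)
    (fun w => |px - w.1| + |py - w.2.1|)

-- ===== PRECONDITION & SPEC =====
-- A always evaluates own_tank[1] and own_tank[2], so it raises IndexError iff the tank list is
-- shorter than 3; Pre_ admits exactly the inputs on which A returns.
def Pre_get_nearst_walls (own_tank : List Int) (map_walls : List (Int × Int × String)) : Prop :=
  3 ≤ own_tank.length
instance (own_tank : List Int) (map_walls : List (Int × Int × String)) : Decidable (Pre_get_nearst_walls own_tank map_walls) := by unfold Pre_get_nearst_walls; infer_instance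

def pvWitness_get_nearst_walls : List Int × (List (Int × Int × String)) :=
  ([0, 1, 2], [(3, 4, "metal"), (0, 0, "water"), (1, 1, "brick"), (0, 1, "metal")])

def Spec_get_nearst_walls (own_tank : List Int) (map_walls : List (Int × Int × String)) (out : List (Int × Int × String)) : Prop := out = get_nearst_walls_alt own_tank map_walls
instance (own_tank : List Int) (map_walls : List (Int × Int × String)) (out : List (Int × Int × String)) : Decidable (Spec_get_nearst_walls own_tank map_walls out) := by unfold Spec_get_nearst_walls; infer_instance

-- ===== CLAIM (what is proved, stated in full; the proofs are below) =====
def Claim_equal_get_nearst_walls : Prop := ∀ (own_tank : List Int) (map_walls : List (Int × Int × String)), Dom_get_nearst_walls own_tank map_walls → Pre_get_nearst_walls own_tank map_walls → Spec_get_nearst_walls own_tank map_walls (get_nearst_walls own_tank map_walls)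

-- ===== LEMMAS AND PROOFS =====

-- enumerate commutes with map on the values
theorem pv_enumerate_map {α β : Type} (f : α → β) (xs : List α) (s : Int) :
    PySem.List.enumerate (xs.map f) s
      = (PySem.List.enumerate xs s).map (fun p => (p.1, f p.2)) := by
  induction xs generalizing s with
  | nil => simp [PySem.List.enumerate_nil]
  | cons x xs ih => simp [PySem.List.enumerate_cons, ih]

-- insertBy commutes with map when the comparison factors through the map
theorem pv_insertBy_map {α β : Type} (g : α → β) (bf : β → β → Bool) (x : α) (ys : List α) :
    PySem.List.insertBy bf (g x) (ys.map g)
      = (PySem.List.insertBy (fun a b => bf (g a) (g b)) x ys).map g := by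
  induction ys with
  | nil => simp [PySem.List.insertBy]
  | cons y ys ih =>
    by_cases h : bf (g x) (g y) = true <;> simp [PySem.List.insertBy, h, ih]

-- stable sort commutes with map when the key factors through the map
theorem pv_sorted_map {α β κ : Type} [LT κ] [DecidableLT κ] (g : α → β) (key : β → κ)
    (xs : List α) :
    PySem.List.sorted (xs.map g) key = (PySem.List.sorted xs (fun a => key (g a))).map g := by
  rw [PySem.List.sorted_eq_foldl_insertBy, PySem.List.sorted_eq_foldl_insertBy]
  suffices h : ∀ (zs : List α),
      (xs.map g).foldl (fun acc x => PySem.List.insertBy (fun a b => decide (key a < key b)) x acc) (zs.map g)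
        = (xs.foldl (fun acc x => PySem.List.insertBy (fun a b => decide (key (g a) < key (g b))) x acc) zs).map g by
    simpa using h []
  induction xs with
  | nil => intro zs; simp
  | cons x xs ih =>
    intro zs
    simp only [List.map_cons, List.foldl_cons]
    rw [pv_insertBy_map g (fun a b => decide (key a < key b)) x zs]
    exact ih _

-- a member of enumerate is the list entry at its index
theorem pv_mem_enumerate_gen {α : Type} (xs : List α) :
    ∀ (s i : Int) (w : α), (i, w) ∈ PySem.List.enumerate xs s →
      ∃ n : Nat, i = s + (n : Int) ∧ xs[n]? = some w := by
  induction xs with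
  | nil => intro s i w h; simp [PySem.List.enumerate_nil] at h
  | cons x xs ih =>
    intro s i w h
    rw [PySem.List.enumerate_cons] at h
    rcases List.mem_cons.mp h with h | h
    · rw [Prod.ext_iff] at h
      exact ⟨0, by simpa using h.1, by simpa using h.2.symm⟩
    · obtain ⟨n, hi, hn⟩ := ih (s + 1) i w h
      exact ⟨n + 1, by push_cast; omega, by simpa using hn⟩

theorem pv_mem_enumerate_getD {α : Type} (xs : List α) (d : α) (i : Int) (w : α)
    (h : (i, w) ∈ PySem.List.enumerate xs 0) : PySem.List.pyGetD xs i d = w := by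
  obtain ⟨n, hi, hn⟩ := pv_mem_enumerate_gen xs 0 i w h
  subst hi
  rw [zero_add, PySem.List.pyGetD_natCast]
  simp [List.getD_eq_getElem?_getD, hn]

-- A's decorate-sort-undecorate block is sorted(ws, key=dist)
theorem pv_block_eq_sorted (ws : List (Int × Int × String)) (dist : (Int × Int × String) → Int) :
    (PySem.List.sorted (PySem.List.enumerate (ws.map dist)) (fun x => x.2)).map
        (fun p => PySem.List.pyGetD ws p.1 (0, 0, ""))
      = PySem.List.sorted ws dist := by
  rw [show PySem.List.enumerate (ws.map dist) = PySem.List.enumerate (ws.map dist) 0 from rfl,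
      pv_enumerate_map dist ws 0]
  rw [pv_sorted_map (g := fun p : Int × (Int × Int × String) => (p.1, dist p.2))
        (key := fun x : Int × Int => x.2)]
  rw [List.map_map]
  have hstep : (PySem.List.sorted (PySem.List.enumerate ws 0)
        (fun p : Int × (Int × Int × String) => dist p.2)).map
        ((fun p : Int × Int => PySem.List.pyGetD ws p.1 ((0:Int), (0:Int), ""))
          ∘ (fun p : Int × (Int × Int × String) => (p.1, dist p.2)))
      = (PySem.List.sorted (PySem.List.enumerate ws 0)
        (fun p : Int × (Int × Int × String) => dist p.2)).map (fun p => p.2) := by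
    apply List.map_congr_left
    intro p hp
    have hmem : p ∈ PySem.List.enumerate ws 0 := by
      have := (PySem.List.mem_sorted (PySem.List.enumerate ws 0)
        (fun p : Int × (Int × Int × String) => dist p.2) false p).mp hp
      simpa using this
    exact pv_mem_enumerate_getD ws _ p.1 p.2 (by simpa using hmem)
  rw [hstep]
  have hback := pv_sorted_map (g := fun p : Int × (Int × Int × String) => p.2) (key := dist)
    (xs := PySem.List.enumerate ws 0)
  rw [PySem.List.map_snd_enumerate] at hback
  rw [← hback]

-- the comparison function of sorted2 on the compound key
def pvBefore2 {α : Type} (t d : α → Int) (a b : α) : Bool :=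
  decide (t a < t b) || (!decide (t b < t a) && decide (d a < d b))

theorem pv_insertBy_split0 {α : Type} (t d : α → Int) (x : α) (hx : t x = 0)
    (M W : List α) (hM : ∀ m ∈ M, t m = 0) (hW : ∀ w ∈ W, t w = 1) :
    PySem.List.insertBy (pvBefore2 t d) x (M ++ W)
      = PySem.List.insertBy (fun a b => decide (d a < d b)) x M ++ W := by
  induction M with
  | nil =>
    cases W with
    | nil => simp [PySem.List.insertBy]
    | cons w ws =>
      have hb : pvBefore2 t d x w = true := by
        have := hW w (by simp)
        simp [pvBefore2, hx, this]
      simp [PySem.List.insertBy, hb]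
  | cons m ms ih =>
    have htm : t m = 0 := hM m (by simp)
    have hb : pvBefore2 t d x m = decide (d x < d m) := by
      simp [pvBefore2, hx, htm]
    by_cases h : d x < d m
    · simp [PySem.List.insertBy, hb, h]
    · simp only [List.cons_append, PySem.List.insertBy, hb, decide_eq_true_eq, h, if_false]
      rw [ih (fun a ha => hM a (by simp [ha]))]

theorem pv_insertBy_split1 {α : Type} (t d : α → Int) (x : α) (hx : t x = 1)
    (M W : List α) (hM : ∀ m ∈ M, t m = 0) (hW : ∀ w ∈ W, t w = 1) :
    PySem.List.insertBy (pvBefore2 t d) x (M ++ W)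
      = M ++ PySem.List.insertBy (fun a b => decide (d a < d b)) x W := by
  induction M with
  | nil =>
    simp only [List.nil_append]
    induction W with
    | nil => simp [PySem.List.insertBy]
    | cons w ws ihw =>
      have htw : t w = 1 := hW w (by simp)
      have hb : pvBefore2 t d x w = decide (d x < d w) := by
        simp [pvBefore2, hx, htw]
      by_cases h : d x < d w
      · simp [PySem.List.insertBy, hb, h]
      · simp only [PySem.List.insertBy, hb, decide_eq_true_eq, h, if_false]
        rw [ihw (fun a ha => hW a (by simp [ha]))]
  | cons m ms ih =>
    have htm : t m = 0 := hM m (by simp)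
    have hb : pvBefore2 t d x m = false := by
      simp only [pvBefore2, hx, htm]
      simp
    simp only [List.cons_append, PySem.List.insertBy, hb, Bool.false_eq_true, if_false]
    rw [ih (fun a ha => hM a (by simp [ha]))]

theorem pv_foldl_split {α : Type} (t d : α → Int) (xs : List α)
    (hxs : ∀ x ∈ xs, t x = 0 ∨ t x = 1) :
    ∀ (M W : List α), (∀ m ∈ M, t m = 0) → (∀ w ∈ W, t w = 1) →
      xs.foldl (fun acc x => PySem.List.insertBy (pvBefore2 t d) x acc) (M ++ W)
        = (xs.filter (fun x => t x == 0)).foldl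
            (fun acc x => PySem.List.insertBy (fun a b => decide (d a < d b)) x acc) M
          ++ (xs.filter (fun x => t x == 1)).foldl
            (fun acc x => PySem.List.insertBy (fun a b => decide (d a < d b)) x acc) W := by
  induction xs with
  | nil => intro M W hM hW; simp
  | cons x xs ih =>
    intro M W hM hW
    rcases hxs x (by simp) with hx | hx
    · have hfilter0 : (x :: xs).filter (fun x => t x == 0) = x :: xs.filter (fun x => t x == 0) := by
        simp [hx]
      have hfilter1 : (x :: xs).filter (fun x => t x == 1) = xs.filter (fun x => t x == 1) := by
        simp [hx]
      rw [hfilter0, hfilter1]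
      simp only [List.foldl_cons]
      rw [pv_insertBy_split0 t d x hx M W hM hW]
      exact ih (fun a ha => hxs a (by simp [ha]))
        (PySem.List.insertBy (fun a b => decide (d a < d b)) x M) W
        (fun a ha => by
          rcases (PySem.List.mem_insertBy _ x a M).mp ha with h | h
          · simpa [h] using hx
          · exact hM a h) hW
    · have hfilter0 : (x :: xs).filter (fun x => t x == 0) = xs.filter (fun x => t x == 0) := by
        simp [hx]
      have hfilter1 : (x :: xs).filter (fun x => t x == 1) = x :: xs.filter (fun x => t x == 1) := by
        simp [hx]
      rw [hfilter0, hfilter1]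
      simp only [List.foldl_cons]
      rw [pv_insertBy_split1 t d x hx M W hM hW]
      exact ih (fun a ha => hxs a (by simp [ha])) M
        (PySem.List.insertBy (fun a b => decide (d a < d b)) x W) hM
        (fun a ha => by
          rcases (PySem.List.mem_insertBy _ x a W).mp ha with h | h
          · simpa [h] using hx
          · exact hW a h)

-- the single stable sort on the compound key splits into the two category sorts
theorem pv_sorted2_split {α : Type} (t d : α → Int) (xs : List α)
    (hxs : ∀ x ∈ xs, t x = 0 ∨ t x = 1) :
    PySem.List.sorted2 xs t d
      = PySem.List.sorted (xs.filter (fun x => t x == 0)) d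
        ++ PySem.List.sorted (xs.filter (fun x => t x == 1)) d := by
  rw [PySem.List.sorted_eq_foldl_insertBy, PySem.List.sorted_eq_foldl_insertBy]
  show xs.foldl (fun acc x => PySem.List.insertBy (pvBefore2 t d) x acc) ([] ++ []) = _
  exact pv_foldl_split t d xs hxs [] [] (by simp) (by simp)

-- ===== VERDICT (by name: the statement is the Claim_ definition above) =====
theorem get_nearst_walls_spec : Claim_equal_get_nearst_walls := by
  intro own_tank map_walls _ _
  unfold Spec_get_nearst_walls get_nearst_walls get_nearst_walls_alt compute_distance
  simp only [PySem.List.foldl_append_singleton_eq_map, List.nil_append]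
  set px := PySem.List.pyGetD own_tank 1 0 with hpx
  set py := PySem.List.pyGetD own_tank 2 0 with hpy
  set dist := fun w : Int × Int × String => |px - w.1| + |py - w.2.1| with hdist
  rw [pv_block_eq_sorted (map_walls.filter (fun w => w.2.2 == "metal")) dist,
      pv_block_eq_sorted (map_walls.filter (fun w => w.2.2 == "water")) dist]
  rw [pv_sorted2_split (fun w : Int × Int × String => if w.2.2 == "metal" then (0:Int) else 1) dist
        (map_walls.filter (fun w => w.2.2 == "metal" || w.2.2 == "water"))
        (by intro x _; by_cases h : x.2.2 == "metal" <;> simp [h])]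
  rw [List.filter_filter, List.filter_filter]
  have h0 : ∀ w : Int × Int × String,
      (((if w.2.2 == "metal" then (0:Int) else 1) == 0) && (w.2.2 == "metal" || w.2.2 == "water"))
        = (w.2.2 == "metal") := by
    intro w; by_cases h : w.2.2 = "metal" <;> simp [h]
  have h1 : ∀ w : Int × Int × String,
      (((if w.2.2 == "metal" then (0:Int) else 1) == 1) && (w.2.2 == "metal" || w.2.2 == "water"))
        = (w.2.2 == "water") := by
    intro w; by_cases h : w.2.2 = "metal" <;> simp [h]
  rw [List.filter_congr (fun w _ => h0 w), List.filter_congr (fun w _ => h1 w)]
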